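-- pv_equiv track=rewrite | github.com/chandra122/OrionAiAgent | job_apply/lever.py | _match_answer
-- ===== SOURCE A (Python) =====
-- def _match_answer(label: str, answers: dict) -> str:
--     label = label.lower()
--     if any(k in label for k in ["salary", "compensation", "pay", "expect"]):
--         return answers.get("salary_expectation", "")
--     if any(k in label for k in ["notice", "start", "available", "when"]):
--         return answers.get("notice_period", "2 weeks")
--     if any(k in label for k in ["hear", "source", "find", "refer"]):
--         return answers.get("how_did_you_hear", "Job board")
--     if any(k in label for k in ["why", "interest", "motivat", "tell us"]):
--         return answers.get("why_interested", "")
--     if any(k in label for k in ["strength", "skill", "experience"]):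
--         return answers.get("greatest_strength", "")
--     return ""
-- ===== SOURCE B (Python) =====
-- # B: single flat pass over a keyword->priority table, computing the minimum-priority
-- # matching rule, instead of A's five staged any()-checks with early returns.
-- KEYWORD_RULE = [
--     ("salary", 0), ("compensation", 0), ("pay", 0), ("expect", 0),
--     ("notice", 1), ("start", 1), ("available", 1), ("when", 1),
--     ("hear", 2), ("source", 2), ("find", 2), ("refer", 2),
--     ("why", 3), ("interest", 3), ("motivat", 3), ("tell us", 3),
--     ("strength", 4), ("skill", 4), ("experience", 4),
-- ]
--
-- RULE_ANSWERS = [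
--     ("salary_expectation", ""),
--     ("notice_period", "2 weeks"),
--     ("how_did_you_hear", "Job board"),
--     ("why_interested", ""),
--     ("greatest_strength", ""),
-- ]
--
--
-- def _match_answer(label: str, answers: dict) -> str:
--     label = label.lower()
--     best = None
--     for kw, rule in KEYWORD_RULE:
--         if kw in label and (best is None or rule < best):
--             best = rule
--     if best is None:
--         return ""
--     key, default = RULE_ANSWERS[best]
--     return answers.get(key, default)
-- ===== Notes on version B (the rewrite author's own statement) =====
-- stated objective: alternative
-- what changed: Replaces A's five staged any()-checks with early returns by one flat pass over a keyword-to-priority table that accumulates the minimum-priority matching rule, then a single indexed lookup of (key, default).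
import Mathlib
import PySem

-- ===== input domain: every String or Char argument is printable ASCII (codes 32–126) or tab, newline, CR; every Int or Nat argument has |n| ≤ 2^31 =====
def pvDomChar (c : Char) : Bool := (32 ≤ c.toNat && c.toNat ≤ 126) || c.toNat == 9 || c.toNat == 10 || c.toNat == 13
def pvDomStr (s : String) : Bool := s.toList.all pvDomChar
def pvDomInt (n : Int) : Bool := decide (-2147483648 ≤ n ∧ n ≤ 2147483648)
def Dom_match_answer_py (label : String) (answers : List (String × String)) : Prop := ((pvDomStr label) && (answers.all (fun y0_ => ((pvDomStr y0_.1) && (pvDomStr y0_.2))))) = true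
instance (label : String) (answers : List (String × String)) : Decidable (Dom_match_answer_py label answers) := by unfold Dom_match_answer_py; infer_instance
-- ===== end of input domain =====

-- B replaces A's five staged any()-checks with one flat minimum-priority pass over a keyword table (alternative; same cost).

-- ===== PORT A =====
def match_answer_py (label : String) (answers : List (String × String)) : String :=
  let lab := PySem.Str.lower label
  if ["salary", "compensation", "pay", "expect"].any (fun k => PySem.Str.isIn k lab) then
    (PySem.Dict.mk answers).getD "salary_expectation" ""
  else if ["notice", "start", "available", "when"].any (fun k => PySem.Str.isIn k lab) then
    (PySem.Dict.mk answers).getD "notice_period" "2 weeks"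
  else if ["hear", "source", "find", "refer"].any (fun k => PySem.Str.isIn k lab) then
    (PySem.Dict.mk answers).getD "how_did_you_hear" "Job board"
  else if ["why", "interest", "motivat", "tell us"].any (fun k => PySem.Str.isIn k lab) then
    (PySem.Dict.mk answers).getD "why_interested" ""
  else if ["strength", "skill", "experience"].any (fun k => PySem.Str.isIn k lab) then
    (PySem.Dict.mk answers).getD "greatest_strength" ""
  else ""

-- ===== PORT B =====
def pvKeywordRule : List (String × Nat) :=
  [ ("salary", 0), ("compensation", 0), ("pay", 0), ("expect", 0),
    ("notice", 1), ("start", 1), ("available", 1), ("when", 1),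
    ("hear", 2), ("source", 2), ("find", 2), ("refer", 2),
    ("why", 3), ("interest", 3), ("motivat", 3), ("tell us", 3),
    ("strength", 4), ("skill", 4), ("experience", 4) ]

def pvRuleAnswers : List (String × String) :=
  [ ("salary_expectation", ""),
    ("notice_period", "2 weeks"),
    ("how_did_you_hear", "Job board"),
    ("why_interested", ""),
    ("greatest_strength", "") ]

-- the loop body: 'if kw in label and (best is None or rule < best): best = rule'
def pvStep (lab : String) (best : Option Nat) (p : String × Nat) : Option Nat :=
  if PySem.Str.isIn p.1 lab && (match best with | none => true | some j => decide (p.2 < j))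
  then some p.2 else best

def match_answer_py_alt (label : String) (answers : List (String × String)) : String :=
  let lab := PySem.Str.lower label
  let best := pvKeywordRule.foldl (pvStep lab) none
  match best with
  | none => ""
  | some i =>
    -- RULE_ANSWERS[best]; best is always in range, so getD is exact here
    let kd := pvRuleAnswers.getD i ("", "")
    (PySem.Dict.mk answers).getD kd.1 kd.2

-- ===== PRECONDITION & SPEC =====
def Spec_match_answer_py (label : String) (answers : List (String × String)) (out : String) : Prop := out = match_answer_py_alt label answers
instance (label : String) (answers : List (String × String)) (out : String) : Decidable (Spec_match_answer_py label answers out) := by unfold Spec_match_answer_py; infer_instance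

-- ===== CLAIM (what is proved, stated in full; the proofs are below) =====
def Claim_equal_match_answer_py : Prop := ∀ (label : String) (answers : List (String × String)), Dom_match_answer_py label answers → Spec_match_answer_py label answers (match_answer_py label answers)

-- ===== LEMMAS AND PROOFS =====

-- merging one rule index into the running minimum
def pvMerge (b : Option Nat) (i : Nat) : Option Nat :=
  match b with
  | none => some i
  | some j => if i < j then some i else some j

theorem pvStep_eq_merge (lab : String) (b : Option Nat) (k : String) (i : Nat) :
    pvStep lab b (k, i) = if PySem.Str.isIn k lab then pvMerge b i else b := by
  unfold pvStep pvMerge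
  cases h : PySem.Str.isIn k lab <;> cases b <;> simp

theorem pvMerge_idem (b : Option Nat) (i : Nat) : pvMerge (pvMerge b i) i = pvMerge b i := by
  cases b with
  | none => simp [pvMerge]
  | some j => by_cases h : i < j <;> simp [pvMerge, h]

theorem fold_const_group (lab : String) (i : Nat) (ks : List String) (b : Option Nat) :
    List.foldl (pvStep lab) b (ks.map (fun k => (k, i))) =
      if ks.any (fun k => PySem.Str.isIn k lab) then pvMerge b i else b := by
  induction ks generalizing b with
  | nil => simp
  | cons k ks ih =>
    simp only [List.map_cons, List.foldl_cons, List.any_cons, pvStep_eq_merge, ih,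
      Bool.or_eq_true]
    by_cases h : PySem.Str.isIn k lab = true
    · by_cases h2 : (ks.any fun k => PySem.Str.isIn k lab) = true
      · rw [if_pos h, if_pos h2, if_pos (Or.inl h), pvMerge_idem]
      · rw [if_pos h, if_neg h2, if_pos (Or.inl h)]
    · by_cases h2 : (ks.any fun k => PySem.Str.isIn k lab) = true
      · rw [if_neg h, if_pos h2, if_pos (Or.inr h2)]
      · rw [if_neg h, if_neg h2, if_neg (by tauto)]

theorem pvKeywordRule_groups :
    pvKeywordRule =
      (["salary", "compensation", "pay", "expect"].map (fun k => (k, 0))) ++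
      (["notice", "start", "available", "when"].map (fun k => (k, 1))) ++
      (["hear", "source", "find", "refer"].map (fun k => (k, 2))) ++
      (["why", "interest", "motivat", "tell us"].map (fun k => (k, 3))) ++
      (["strength", "skill", "experience"].map (fun k => (k, 4))) := rfl

-- ===== VERDICT (by name: the statement is the Claim_ definition above) =====
theorem match_answer_py_spec : Claim_equal_match_answer_py := by
  intro label answers _
  unfold Spec_match_answer_py match_answer_py match_answer_py_alt
  rw [pvKeywordRule_groups]
  simp only [List.foldl_append, fold_const_group]
  generalize PySem.Str.lower label = lab
  generalize h0 : (["salary", "compensation", "pay", "expect"].any (fun k => PySem.Str.isIn k lab)) = a0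
  generalize h1 : (["notice", "start", "available", "when"].any (fun k => PySem.Str.isIn k lab)) = a1
  generalize h2 : (["hear", "source", "find", "refer"].any (fun k => PySem.Str.isIn k lab)) = a2
  generalize h3 : (["why", "interest", "motivat", "tell us"].any (fun k => PySem.Str.isIn k lab)) = a3
  generalize h4 : (["strength", "skill", "experience"].any (fun k => PySem.Str.isIn k lab)) = a4
  cases a0 <;> cases a1 <;> cases a2 <;> cases a3 <;> cases a4 <;> rfl
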